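-- pv_equiv track=rewrite | github.com/Ritesh7767/dataStructure | questions.py | longestArr
-- ===== SOURCE A (Python) =====
-- def longestArr(k, arr):
--
--     left = 0
--     maxLength = 0
--     maxArr = []
--     char_index_map = {}
--
--     for right in range(len(arr)):
--
--         if arr[right] in char_index_map:
--             char_index_map[arr[right]] += 1
--         else:
--             char_index_map[arr[right]] = 1
--
--         while char_index_map[arr[right]] > k:
--
--             if right - left > maxLength:
--                 maxLength = right - left
--                 maxArr = arr[left:right]
--
--             char_index_map[arr[left]] -= 1
--             left += 1
--
--     if len(arr) - left > maxLength:
--         maxLength = len(arr) - left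
--         maxArr = arr[left:]
--
--     return maxArr, maxLength
-- ===== SOURCE B (Python) =====
-- def longestArr(k, arr):
--     n = len(arr)
--     best_len = 0
--     best_arr = []
--     for i in range(n):
--         counts = {}
--         j = i
--         while j < n:
--             c = counts.get(arr[j], 0) + 1
--             if c > k:
--                 break
--             counts[arr[j]] = c
--             j += 1
--         if j - i > best_len:
--             best_len = j - i
--             best_arr = arr[i:j]
--     return best_arr, best_len
-- ===== Notes on version B (the rewrite author's own statement) =====
-- stated objective: alternative
-- what changed: A's O(n) sliding window with a shrinking left pointer and a shared count dict is replaced by an independent brute-force scan: for each start index a fresh count dict is grown forward until some count would exceed k, tracking the leftmost longest window with a strict comparison.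
import Mathlib
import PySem

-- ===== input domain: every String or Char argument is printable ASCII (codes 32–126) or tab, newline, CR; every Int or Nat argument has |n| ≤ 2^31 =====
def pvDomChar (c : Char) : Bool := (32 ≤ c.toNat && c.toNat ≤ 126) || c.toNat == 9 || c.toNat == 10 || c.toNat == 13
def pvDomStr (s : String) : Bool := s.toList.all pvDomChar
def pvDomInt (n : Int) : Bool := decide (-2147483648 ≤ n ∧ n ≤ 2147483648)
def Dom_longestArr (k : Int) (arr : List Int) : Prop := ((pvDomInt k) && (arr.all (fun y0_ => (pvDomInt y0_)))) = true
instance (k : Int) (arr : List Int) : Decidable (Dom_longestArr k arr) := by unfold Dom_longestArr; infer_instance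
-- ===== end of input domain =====

-- B replaces A's single-pass sliding window (shared left pointer and one count dict)
-- by an independent brute-force scan per start index (objective: alternative, not faster).

-- ===== PORT A =====
-- the inner `while` loop of A; fuel only makes the recursion total (within Pre_ it never runs out)
def aShrink (k : Int) (arr : List Int) (right : Int) :
    Nat → Int → PySem.Dict Int Int → Int → List Int → Int × PySem.Dict Int Int × Int × List Int
  | 0, left, m, maxLen, maxArr => (left, m, maxLen, maxArr)
  | fuel+1, left, m, maxLen, maxArr =>
    if m.getD (PySem.List.pyGetD arr right 0) 0 > k then
      let p := if right - left > maxLen then (right - left, PySem.List.slice arr (some left) (some right))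
               else (maxLen, maxArr)
      let lv := PySem.List.pyGetD arr left 0
      aShrink k arr right fuel (left + 1) (m.insert lv (m.getD lv 0 - 1)) p.1 p.2
    else (left, m, maxLen, maxArr)

-- the body of A's `for right in range(len(arr))` loop
def aBody (k : Int) (arr : List Int) (st : Int × PySem.Dict Int Int × Int × List Int) (right : Int) :
    Int × PySem.Dict Int Int × Int × List Int :=
  match st with
  | (left, m, maxLen, maxArr) =>
    let rv := PySem.List.pyGetD arr right 0
    let m' := if m.contains rv then m.insert rv (m.getD rv 0 + 1) else m.insert rv 1
    aShrink k arr right (arr.length + 1) left m' maxLen maxArr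

def longestArr (k : Int) (arr : List Int) : List Int × Int :=
  let n : Int := arr.length
  match (PySem.List.pyRange 0 n 1).foldl (aBody k arr) (0, PySem.Dict.empty, 0, []) with
  | (left, _, maxLen, maxArr) =>
    if n - left > maxLen then (PySem.List.slice arr (some left) none, n - left) else (maxArr, maxLen)

-- ===== PORT B =====
-- Source B's inner `while j < n` walk: length of the longest prefix that keeps every count ≤ k
def bWalk (k : Int) : List Int → PySem.Dict Int Int → Nat
  | [], _ => 0
  | v :: rest, counts =>
    let c := counts.getD v 0 + 1
    if c > k then 0 else bWalk k rest (counts.insert v c) + 1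

def longestArr_alt (k : Int) (arr : List Int) : List Int × Int :=
  (List.range arr.length).foldl
    (fun best i =>
      let L := bWalk k (arr.drop i) PySem.Dict.empty
      if (L : Int) > best.2 then ((arr.drop i).take L, (L : Int)) else best)
    ([], 0)

-- ===== PRECONDITION & SPEC =====
-- Pre_ excludes exactly the inputs where A raises IndexError: k < 0 with a nonempty list
-- (the left pointer is pushed past the end of the array).
def Pre_longestArr (k : Int) (arr : List Int) : Prop := 0 ≤ k ∨ arr = []
instance (k : Int) (arr : List Int) : Decidable (Pre_longestArr k arr) := by
  unfold Pre_longestArr; infer_instance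

def pvWitness_longestArr : Int × List Int := (1, [1, 2, 1, 2])

def Spec_longestArr (k : Int) (arr : List Int) (out : List Int × Int) : Prop := out = longestArr_alt k arr
instance (k : Int) (arr : List Int) (out : List Int × Int) : Decidable (Spec_longestArr k arr out) := by
  unfold Spec_longestArr; infer_instance

-- ===== CLAIM (what is proved, stated in full; the proofs are below) =====
def Claim_equal_longestArr : Prop := ∀ (k : Int) (arr : List Int),
  Dom_longestArr k arr → Pre_longestArr k arr → Spec_longestArr k arr (longestArr k arr)

-- ===== LEMMAS AND PROOFS =====

-- `Valid k w`: every element occurs at most k times in w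
def Valid (k : Int) (w : List Int) : Prop := ∀ x ∈ w, (w.count x : Int) ≤ k

-- best-so-far update, shared shape of both programs' recording step (state = (window, length))
def bestStep (b c : List Int × Int) : List Int × Int := if c.2 > b.2 then c else b

-- the candidate B produces for start index i
def cand (k : Int) (arr : List Int) (i : Nat) : List Int × Int :=
  ((arr.drop i).take (bWalk k (arr.drop i) PySem.Dict.empty), (bWalk k (arr.drop i) PySem.Dict.empty : Int))

def foldBest (k : Int) (arr : List Int) (b : List Int × Int) (i len : Nat) : List Int × Int :=
  (List.range' i len).foldl (fun b j => bestStep b (cand k arr j)) b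

lemma valid_of_sublist {k : Int} {w w' : List Int} (h : w.Sublist w') (hv : Valid k w') : Valid k w := by
  intro x hx
  calc (w.count x : Int) ≤ (w'.count x : Int) := by exact_mod_cast h.count_le x
    _ ≤ k := hv x (h.mem hx)

lemma bWalk_le (k : Int) : ∀ (l : List Int) (c : PySem.Dict Int Int), bWalk k l c ≤ l.length := by
  intro l
  induction l with
  | nil => intro c; simp [bWalk]
  | cons v rest ih =>
      intro c
      simp only [bWalk, List.length_cons]
      split
      · omega
      · have := ih (c.insert v (c.getD v 0 + 1)); omega

lemma count_shift (p t : List Int) (v x : Int) :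
    ((p ++ v :: t).count x : Int) = (((p ++ [v]) ++ t).count x : Int) := by
  simp [List.count_append]

lemma mem_shift (p t : List Int) (v x : Int) :
    x ∈ p ++ v :: t ↔ x ∈ (p ++ [v]) ++ t := by
  simp [List.mem_append, List.mem_cons]

lemma bWalk_spec (k : Int) : ∀ (l p : List Int) (c : PySem.Dict Int Int),
    (∀ x, c.getD x 0 = (p.count x : Int)) →
    ((∀ x ∈ l.take (bWalk k l c), ((p ++ l.take (bWalk k l c)).count x : Int) ≤ k) ∧
     (∀ L, L ≤ l.length → (∀ x ∈ p ++ l.take L, ((p ++ l.take L).count x : Int) ≤ k) → L ≤ bWalk k l c)) := by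
  intro l
  induction l with
  | nil =>
      intro p c hc
      constructor
      · intro x hx; simp at hx
      · intro L hL _; simp at hL; omega
  | cons v rest ih =>
      intro p c hc
      by_cases hgt : c.getD v 0 + 1 > k
      · constructor
        · intro x hx; simp [bWalk, hgt] at hx
        · intro L hL hval
          simp only [bWalk, if_pos hgt]
          by_contra hpos
          obtain ⟨L', rfl⟩ : ∃ L', L = L' + 1 := ⟨L - 1, by omega⟩
          have hvmem : v ∈ p ++ (v :: rest).take (L' + 1) := by
            simp [List.take_succ_cons]
          have := hval v hvmem
          rw [List.take_succ_cons] at this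
          have hcount : (p.count v : Int) + 1 ≤ ((p ++ v :: rest.take L').count v : Int) := by
            simp [List.count_append]
          rw [hc v] at hgt
          omega
      · -- extend
        have hc' : ∀ x, (c.insert v (c.getD v 0 + 1)).getD x 0 = (((p ++ [v]).count x : Int)) := by
          intro x
          by_cases hx : x = v
          · subst hx
            rw [PySem.Dict.getD_insert_self c x _ 0, hc x]
            simp [List.count_append]
          · rw [PySem.Dict.getD_insert_of_ne c _ 0 hx, hc x]
            simp [List.count_append, Ne.symm hx]
        obtain ⟨IH1, IH2⟩ := ih (p ++ [v]) _ hc'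
        have heq : bWalk k (v :: rest) c = bWalk k rest (c.insert v (c.getD v 0 + 1)) + 1 := by
          simp [bWalk, hgt]
        set w := bWalk k rest (c.insert v (c.getD v 0 + 1)) with hw
        constructor
        · intro x hx
          rw [heq, List.take_succ_cons] at hx ⊢
          rw [count_shift]
          rcases List.mem_cons.mp hx with rfl | hx'
          · by_cases hmem : x ∈ rest.take w
            · exact IH1 x hmem
            · have h0 : (rest.take w).count x = 0 := List.count_eq_zero_of_not_mem hmem
              have hcv := hc x
              simp only [List.count_append, h0, List.count_singleton]
              push_cast
              omega
          · exact IH1 x hx'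
        · intro L hL hval
          rw [heq]
          match L with
          | 0 => omega
          | L' + 1 =>
            have hLl : L' ≤ rest.length := by simpa using hL
            have hval' : ∀ x ∈ (p ++ [v]) ++ rest.take L',
                (((p ++ [v]) ++ rest.take L').count x : Int) ≤ k := by
              intro x hx
              rw [← count_shift]
              exact hval x (by rw [List.take_succ_cons, mem_shift]; exact hx) |>.trans_eq' (by
                rw [List.take_succ_cons, count_shift])
            have := IH2 L' hLl hval'
            omega

-- the two handy corollaries (p := [])
lemma bWalk_valid (k : Int) (l : List Int) : Valid k (l.take (bWalk k l PySem.Dict.empty)) := by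
  have h := (bWalk_spec k l [] PySem.Dict.empty (by simp [PySem.Dict.getD_empty])).1
  intro x hx
  simpa using h x hx

lemma bWalk_max (k : Int) (l : List Int) (L : Nat) (hL : L ≤ l.length) (hv : Valid k (l.take L)) :
    L ≤ bWalk k l PySem.Dict.empty := by
  have h := (bWalk_spec k l [] PySem.Dict.empty (by simp [PySem.Dict.getD_empty])).2
  exact h L hL (by simpa [Valid] using hv)

-- F i = n - i whenever the whole suffix from i is valid
lemma bWalk_suffix_eq (k : Int) (arr : List Int) (i : Nat) (hv : Valid k (arr.drop i)) :
    bWalk k (arr.drop i) PySem.Dict.empty = arr.length - i := by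
  have h1 := bWalk_le k (arr.drop i) PySem.Dict.empty
  have h2 := bWalk_max k (arr.drop i) (arr.drop i).length le_rfl (by rw [List.take_length]; exact hv)
  simp only [List.length_drop] at h1 h2
  omega

-- fold over candidates whose value never beats b is the identity
lemma foldBest_const (k : Int) (arr : List Int) (b : List Int × Int) (i len : Nat)
    (h : ∀ j, i ≤ j → j < i + len → (cand k arr j).2 ≤ b.2) : foldBest k arr b i len = b := by
  induction len generalizing i b with
  | zero => simp [foldBest]
  | succ len ih =>
      have hstep : bestStep b (cand k arr i) = b := by
        have := h i le_rfl (by omega)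
        simp [bestStep]; omega
      simp only [foldBest, List.range'_succ, List.foldl_cons]
      rw [show (List.foldl (fun b j => bestStep b (cand k arr j)) (bestStep b (cand k arr i))
            (List.range' (i+1) len)) = foldBest k arr (bestStep b (cand k arr i)) (i+1) len from rfl,
          hstep]
      exact ih b (i+1) (fun j h1 h2 => h j (by omega) (by omega))

lemma foldBest_snd_ge (k : Int) (arr : List Int) (b : List Int × Int) (i len : Nat) :
    b.2 ≤ (foldBest k arr b i len).2 := by
  induction len generalizing i b with
  | zero => simp [foldBest]
  | succ len ih =>
      simp only [foldBest, List.range'_succ, List.foldl_cons]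
      have h1 : b.2 ≤ (bestStep b (cand k arr i)).2 := by
        simp only [bestStep]; split <;> omega
      exact le_trans h1 (ih (bestStep b (cand k arr i)) (i+1))

-- window notation: win i j = arr[i:j] = (arr.drop i).take (j - i)
lemma win_snoc (arr : List Int) (i r : Nat) (hi : i ≤ r) (hr : r < arr.length) :
    (arr.drop i).take (r + 1 - i) = (arr.drop i).take (r - i) ++ [arr[r]] := by
  have h1 : r + 1 - i = (r - i) + 1 := by omega
  rw [h1, List.take_add_one]
  congr 1
  have h2 : (arr.drop i)[r - i]? = arr[i + (r - i)]? := List.getElem?_drop ..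
  have h3 : i + (r - i) = r := by omega
  rw [h3] at h2
  rw [h2, List.getElem?_eq_getElem hr]
  simp

lemma win_cons (arr : List Int) (i r : Nat) (hi : i ≤ r) (hn : i < arr.length) :
    (arr.drop i).take (r + 1 - i) = arr[i] :: (arr.drop (i + 1)).take (r - i) := by
  rw [List.drop_eq_getElem_cons hn]
  have h1 : r + 1 - i = (r - i) + 1 := by omega
  rw [h1, List.take_succ_cons]

-- the inner while loop: full characterisation
lemma aShrink_spec (k : Int) (arr : List Int) (hk : 0 ≤ k) (r : Nat) (hr : r < arr.length) :
    ∀ (fuel i : Nat) (m : PySem.Dict Int Int) (bl : Int) (ba : List Int),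
    i ≤ r + 1 →
    (∀ x, m.getD x 0 = (((arr.drop i).take (r + 1 - i)).count x : Int)) →
    Valid k ((arr.drop i).take (r - i)) →
    r + 2 - i ≤ fuel →
    ∃ (i' : Nat) (m' : PySem.Dict Int Int),
      i ≤ i' ∧ i' ≤ r + 1 ∧
      (∀ x, m'.getD x 0 = (((arr.drop i').take (r + 1 - i')).count x : Int)) ∧
      Valid k ((arr.drop i').take (r + 1 - i')) ∧
      aShrink k arr (r : Int) fuel (i : Int) m bl ba =
        ((i' : Int), m', (foldBest k arr (ba, bl) i (i' - i)).2, (foldBest k arr (ba, bl) i (i' - i)).1) := by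
  intro fuel
  induction fuel with
  | zero => intro i m bl ba hi hm hv hfuel; omega
  | succ fuel ih =>
    intro i m bl ba hi hm hv hfuel
    have hrv : PySem.List.pyGetD arr (r : Int) 0 = arr[r] := by
      simp [PySem.List.pyGetD_natCast, List.getD_eq_getElem?_getD, List.getElem?_eq_getElem hr]
    simp only [aShrink, hrv]
    by_cases hcond : m.getD arr[r] 0 > k
    · -- while-condition holds: record, decrement arr[left], move left
      have hir : i ≤ r := by
        by_contra h
        have hi1 : i = r + 1 := by omega
        rw [hm arr[r], hi1] at hcond
        simp at hcond
        omega
      have hin : i < arr.length := lt_of_le_of_lt hir hr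
      have hFge : r - i ≤ bWalk k (arr.drop i) PySem.Dict.empty :=
        bWalk_max k _ _ (by simp; omega) hv
      have hFle : bWalk k (arr.drop i) PySem.Dict.empty ≤ r - i := by
        by_contra h
        rw [not_le] at h
        have hsub : ((arr.drop i).take (r + 1 - i)).Sublist
            ((arr.drop i).take (bWalk k (arr.drop i) PySem.Dict.empty)) :=
          List.take_sublist_take_left (by omega)
        have hvw := valid_of_sublist hsub (bWalk_valid k _)
        have hmem : arr[r] ∈ (arr.drop i).take (r + 1 - i) := by
          rw [win_snoc arr i r hir hr]; simp
        have := hvw _ hmem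
        rw [hm arr[r]] at hcond
        omega
      have hF : bWalk k (arr.drop i) PySem.Dict.empty = r - i := le_antisymm hFle hFge
      have hlv : PySem.List.pyGetD arr (i : Int) 0 = arr[i] := by
        simp [PySem.List.pyGetD_natCast, List.getD_eq_getElem?_getD, List.getElem?_eq_getElem hin]
      have hwc : (arr.drop i).take (r + 1 - i) = arr[i] :: (arr.drop (i + 1)).take (r - i) :=
        win_cons arr i r hir hin
      have hm' : ∀ x, (m.insert arr[i] (m.getD arr[i] 0 - 1)).getD x 0 =
          (((arr.drop (i + 1)).take (r + 1 - (i + 1))).count x : Int) := by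
        intro x
        have h1 : r + 1 - (i + 1) = r - i := by omega
        by_cases hx : x = arr[i]
        · rw [hx, PySem.Dict.getD_insert_self, hm arr[i], hwc, h1]
          simp
        · rw [PySem.Dict.getD_insert_of_ne _ _ _ hx, hm x, hwc, h1]
          simp [Ne.symm hx]
      have hv' : Valid k ((arr.drop (i + 1)).take (r - (i + 1))) := by
        by_cases hir' : i < r
        · have hwc' : (arr.drop i).take (r - i) = arr[i] :: (arr.drop (i + 1)).take (r - 1 - i) := by
            have h2 : r - i = (r - 1) + 1 - i := by omega
            rw [h2, win_cons arr i (r - 1) (by omega) hin]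
          apply valid_of_sublist _ hv
          rw [hwc']
          have h3 : r - (i + 1) = r - 1 - i := by omega
          rw [h3]
          exact List.sublist_cons_self _ _
        · have h0 : r - (i + 1) = 0 := by omega
          rw [h0]
          intro x hx; simp at hx
      obtain ⟨i', m', h1, h2, h3, h4, h5⟩ := ih (i + 1) _ _ _ (by omega) hm' hv' (by omega)
      refine ⟨i', m', by omega, h2, h3, h4, ?_⟩
      rw [if_pos hcond]
      have hcast : (i : Int) + 1 = ((i + 1 : Nat) : Int) := by push_cast; ring
      have hslice : PySem.List.slice arr (some (i : Int)) (some (r : Int)) = (arr.drop i).take (r - i) :=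
        PySem.List.slice_natCast ..
      have hpcand :
          (if (r : Int) - (i : Int) > bl then ((r : Int) - (i : Int), PySem.List.slice arr (some (i : Int)) (some (r : Int))) else (bl, ba)) =
          ((bestStep (ba, bl) (cand k arr i)).2, (bestStep (ba, bl) (cand k arr i)).1) := by
        rw [hslice]
        have hcast2 : (r : Int) - (i : Int) = ((r - i : Nat) : Int) := by omega
        simp only [bestStep, cand, hF, hcast2]
        split_ifs with hc1 <;> rfl
      have hfold : foldBest k arr (ba, bl) i (i' - i) =
          foldBest k arr (bestStep (ba, bl) (cand k arr i)) (i + 1) (i' - (i + 1)) := by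
        have h6 : i' - i = (i' - (i + 1)) + 1 := by omega
        rw [h6]
        simp only [foldBest, List.range'_succ, List.foldl_cons]
      simp only [hpcand, hlv, hcast] at *
      rw [h5, hfold]
    · -- while-condition fails: loop exits
      refine ⟨i, m, le_rfl, hi, hm, ?_, ?_⟩
      · have hcnt : ((((arr.drop i).take (r + 1 - i)).count arr[r]) : Int) ≤ k := by
          rw [← hm arr[r]]; exact not_lt.mp hcond
        by_cases hir : i ≤ r
        · intro x hx
          by_cases hxr : x = arr[r]
          · rw [hxr]; exact hcnt
          · have hx' : x ∈ (arr.drop i).take (r - i) := by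
              rcases List.mem_append.mp ((win_snoc arr i r hir hr) ▸ hx) with h | h
              · exact h
              · exact absurd (by simpa using h) hxr
            have h0 : List.count x [arr[r]] = 0 :=
              List.count_eq_zero_of_not_mem (by simp [hxr])
            rw [win_snoc arr i r hir hr, List.count_append, h0]
            have := hv x hx'
            push_cast
            omega
        · have h0 : r + 1 - i = 0 := by omega
          rw [h0]
          intro x hx; simp at hx
      · rw [if_neg hcond]
        simp [foldBest]

lemma foldBest_append (k : Int) (arr : List Int) (b : List Int × Int) (s a c : Nat) :
    foldBest k arr b s (a + c) = foldBest k arr (foldBest k arr b s a) (s + a) c := by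
  simp only [foldBest]
  rw [← List.range'_append_1, List.foldl_append]

-- the outer for loop: invariant at every prefix of range(n)
lemma aOuter_spec (k : Int) (arr : List Int) (hk : 0 ≤ k) :
    ∀ (r : Nat), r ≤ arr.length →
    ∃ (i' : Nat) (m' : PySem.Dict Int Int),
      i' ≤ r ∧
      (∀ x, m'.getD x 0 = (((arr.drop i').take (r - i')).count x : Int)) ∧
      Valid k ((arr.drop i').take (r - i')) ∧
      (PySem.List.pyRange 0 (r : Int) 1).foldl (aBody k arr) (0, PySem.Dict.empty, 0, []) =
        ((i' : Int), m', (foldBest k arr ([], 0) 0 i').2, (foldBest k arr ([], 0) 0 i').1) := by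
  intro r
  induction r with
  | zero =>
      intro _
      refine ⟨0, PySem.Dict.empty, le_rfl, ?_, ?_, ?_⟩
      · intro x; simp [PySem.Dict.getD_empty]
      · intro x hx; simp at hx
      · simp [PySem.List.pyRange_one_eq_nil, foldBest]
  | succ r ihr =>
      intro hr1
      have hr : r < arr.length := by omega
      obtain ⟨i', m', hle, hm, hv, heq⟩ := ihr (by omega)
      have hpeel : PySem.List.pyRange 0 ((r : Nat) + 1 : Int) 1 =
          PySem.List.pyRange 0 (r : Int) 1 ++ [(r : Int)] :=
        PySem.List.pyRange_one_succ_right (by positivity)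
      have hcast : (((r : Nat) + 1 : Nat) : Int) = ((r : Nat) : Int) + 1 := by push_cast; ring
      rw [hcast, hpeel, List.foldl_append, heq]
      have hrv : PySem.List.pyGetD arr (r : Int) 0 = arr[r] := by
        simp [PySem.List.pyGetD_natCast, List.getD_eq_getElem?_getD, List.getElem?_eq_getElem hr]
      have hsnoc := win_snoc arr i' r hle hr
      -- the count map after the insert at the top of the loop body
      have hm2 : ∀ x, ((if m'.contains arr[r] then m'.insert arr[r] (m'.getD arr[r] 0 + 1)
            else m'.insert arr[r] 1)).getD x 0 =
          (((arr.drop i').take (r + 1 - i')).count x : Int) := by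
        intro x
        have hone : ∀ y : Int, (List.count y [arr[r]] : Int) = if y = arr[r] then 1 else 0 := by
          intro y
          by_cases hy : y = arr[r]
          · simp [hy]
          · rw [List.count_eq_zero_of_not_mem (by simp [hy])]; simp [hy]
        by_cases hc : m'.contains arr[r]
        · rw [if_pos hc]
          by_cases hx : x = arr[r]
          · rw [hx, PySem.Dict.getD_insert_self, hm arr[r], hsnoc, List.count_append]
            push_cast
            rw [hone arr[r]]
            simp
          · rw [PySem.Dict.getD_insert_of_ne _ _ _ hx, hm x, hsnoc, List.count_append]
            push_cast
            rw [hone x]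
            simp [hx]
        · rw [if_neg hc]
          have hz : m'.getD arr[r] 0 = 0 :=
            PySem.Dict.getD_of_not_contains m' 0 (by simpa using hc)
          by_cases hx : x = arr[r]
          · rw [hx, PySem.Dict.getD_insert_self, hsnoc, List.count_append]
            have : (List.count arr[r] ((arr.drop i').take (r - i')) : Int) = 0 := by
              rw [← hm arr[r]]; exact hz
            push_cast
            rw [hone arr[r]]
            simp only [if_true]
            omega
          · rw [PySem.Dict.getD_insert_of_ne _ _ _ hx, hm x, hsnoc, List.count_append]
            push_cast
            rw [hone x]
            simp [hx]
      obtain ⟨i'', m'', h1, h2, h3, h4, h5⟩ :=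
        aShrink_spec k arr hk r hr (arr.length + 1) i'
          (if m'.contains arr[r] then m'.insert arr[r] (m'.getD arr[r] 0 + 1) else m'.insert arr[r] 1)
          (foldBest k arr ([], 0) 0 i').2 (foldBest k arr ([], 0) 0 i').1
          (by omega) hm2 hv (by omega)
      refine ⟨i'', m'', by omega, h3, h4, ?_⟩
      show aBody k arr ((i' : Int), m', (foldBest k arr ([], 0) 0 i').2, (foldBest k arr ([], 0) 0 i').1) (r : Int) = _
      simp only [aBody, hrv]
      rw [h5]
      have hfold : foldBest k arr ([], 0) 0 i'' =
          foldBest k arr (foldBest k arr ([], 0) 0 i') i' (i'' - i') := by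
        have h6 : i'' = i' + (i'' - i') := by omega
        rw [h6, foldBest_append]
        simp
      rw [hfold]

lemma alt_eq_foldBest (k : Int) (arr : List Int) :
    longestArr_alt k arr = foldBest k arr ([], 0) 0 arr.length := by
  simp [longestArr_alt, foldBest, List.range_eq_range', cand, bestStep]

-- ===== VERDICT (by name: the statement is the Claim_ definition above) =====
lemma bestStep_snd_ge (b c : List Int × Int) : c.2 ≤ (bestStep b c).2 := by
  simp only [bestStep]; split <;> omega

theorem longestArr_spec : Claim_equal_longestArr := by
  intro k arr _ hpre
  unfold Spec_longestArr
  by_cases hk : 0 ≤ k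
  · obtain ⟨i', m', hle, hm, hv, heq⟩ := aOuter_spec k arr hk arr.length le_rfl
    have hdrop : (arr.drop i').take (arr.length - i') = arr.drop i' := by
      have h1 : arr.length - i' = (arr.drop i').length := by simp
      rw [h1, List.take_length]
    have hVd : Valid k (arr.drop i') := by rw [← hdrop]; exact hv
    have hF : bWalk k (arr.drop i') PySem.Dict.empty = arr.length - i' :=
      bWalk_suffix_eq k arr i' hVd
    have hc2 : ((arr.length - i' : Nat) : Int) = (arr.length : Int) - (i' : Int) := by omega
    have hcand : cand k arr i' = (arr.drop i', (arr.length : Int) - (i' : Int)) := by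
      simp only [cand, hF, hdrop, hc2]
    have hA : longestArr k arr = bestStep (foldBest k arr ([], 0) 0 i') (cand k arr i') := by
      simp only [longestArr]
      rw [heq, hcand]
      simp only [bestStep]
      rw [PySem.List.slice_from_natCast]
    have hB2 : (0 : Int) ≤ (foldBest k arr ([], 0) 0 i').2 := foldBest_snd_ge k arr ([], 0) 0 i'
    rw [hA, alt_eq_foldBest]
    have hsplit : arr.length = i' + (arr.length - i') := by omega
    rw [hsplit, foldBest_append]
    simp only [Nat.zero_add]
    by_cases hlt : i' < arr.length
    · have h1 : arr.length - i' = 1 + (arr.length - i' - 1) := by omega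
      rw [h1, foldBest_append]
      have hone : foldBest k arr (foldBest k arr ([], 0) 0 i') i' 1 =
          bestStep (foldBest k arr ([], 0) 0 i') (cand k arr i') := by
        simp [foldBest]
      rw [hone, hcand]
      refine (foldBest_const k arr _ (i' + 1) (arr.length - i' - 1) ?_).symm
      intro j hj1 hj2
      have hj : i' ≤ j := by omega
      have hVj : Valid k (arr.drop j) := valid_of_sublist (List.drop_sublist_drop_left arr hj) hVd
      have hFj : bWalk k (arr.drop j) PySem.Dict.empty = arr.length - j :=
        bWalk_suffix_eq k arr j hVj
      have hge := bestStep_snd_ge (foldBest k arr ([], 0) 0 i') (cand k arr i')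
      rw [hcand] at hge
      simp only [cand, hFj]
      omega
    · have h0 : arr.length - i' = 0 := by omega
      rw [h0]
      have hcz : (cand k arr i').2 = 0 := by
        rw [hcand]
        show (arr.length : Int) - (i' : Int) = 0
        omega
      have hzero : foldBest k arr (foldBest k arr ([], 0) 0 i') i' 0 = foldBest k arr ([], 0) 0 i' := by
        simp [foldBest]
      rw [hzero]
      simp only [bestStep, hcz]
      rw [if_neg (by omega)]
  · have harr : arr = [] := by
      rcases hpre with h | h
      · omega
      · exact h
    subst harr
    rfl
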